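-- pv_equiv track=rewrite | github.com/sschlingmann04/Advent-of-Code | 2016/day07.py | find_TLS_IPs
-- ===== SOURCE A (Python) =====
-- def find_TLS_IPs(IPs: list[list[str]]):
--     TLS_IPs = []
--
--     for IP in IPs:
--         ABBA_found_inside_brackets, ABBA_found_outside_brackets = False, False
--         for index, seq in enumerate(IP):
--             # Creates a sliding window that checks each string of 4 consecutive characters in the sequence
--             for i in range(0, len(seq) - 3):
--                 current_seq = seq[i:i+4]
--                 # If the sequence is a palindrome (reads the same forwards and reversed) and the first and second characters are different, it is a valid ABBA sequence
--                 if "".join(reversed(current_seq)) == current_seq and current_seq[0] != current_seq[1]: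
--                     # Based on how IPs have been parsed, the sequences outside square brackets always have even indexes and the ones inside square brackets always have odd indexes
--                     # With this in mind, check if index is even or odd to determine whether this sequence was found inside or outside brackets
--                     if index % 2 == 0:
--                         ABBA_found_outside_brackets = True
--                     else:
--                         ABBA_found_inside_brackets = True
--                     break
--
--             if ABBA_found_inside_brackets:
--                 break
--
--         if ABBA_found_outside_brackets and not ABBA_found_inside_brackets:
--             TLS_IPs.append(IP)
--
--     return TLS_IPs
-- ===== SOURCE B (Python) =====
-- def has_abba(s):
--     # Stage 1: collect positions of doubled characters (the "bb" core of an ABBA);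
--     # Stage 2: an ABBA exists iff some double has matching, distinct flanking chars.
--     doubles = [k for k in range(len(s) - 1) if s[k] == s[k + 1]]
--     return any(1 <= k <= len(s) - 3 and s[k - 1] == s[k + 2] and s[k - 1] != s[k]
--                for k in doubles)
--
--
-- def find_TLS_IPs(IPs: list[list[str]]):
--     # Even-indexed sequences are outside brackets, odd-indexed inside; the IP
--     # supports TLS iff the set of parities of ABBA-bearing sequences is exactly {0}.
--     result = []
--     for IP in IPs:
--         parities = {i % 2 for i, seq in enumerate(IP) if has_abba(seq)}
--         if parities == {0}:
--             result.append(IP)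
--     return result
-- ===== Notes on version B (the rewrite author's own statement) =====
-- stated objective: alternative
-- what changed: ABBA detection pivots on doubled middle pairs (collect positions where s[k]==s[k+1], then check distinct matching flanks) instead of A's 4-char slice-and-reverse sliding window, and the outer flag-and-break loop is replaced by building the set of parities of ABBA-bearing sequence indices and testing it against {0}.
import Mathlib
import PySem

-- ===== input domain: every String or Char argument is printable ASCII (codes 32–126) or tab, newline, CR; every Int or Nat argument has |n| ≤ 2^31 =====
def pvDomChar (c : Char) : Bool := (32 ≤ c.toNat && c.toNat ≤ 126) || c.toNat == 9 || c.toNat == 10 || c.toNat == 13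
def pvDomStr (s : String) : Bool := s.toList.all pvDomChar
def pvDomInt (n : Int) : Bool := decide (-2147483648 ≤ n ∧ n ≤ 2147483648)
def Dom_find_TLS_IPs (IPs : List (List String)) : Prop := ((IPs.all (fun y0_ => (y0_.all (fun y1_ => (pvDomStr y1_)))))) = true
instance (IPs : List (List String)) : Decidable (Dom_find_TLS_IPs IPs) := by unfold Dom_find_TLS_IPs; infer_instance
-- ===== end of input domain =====

-- B detects an ABBA by pivoting on doubled middle pairs (positions with s[k]==s[k+1], then a
-- distinct matching flank) instead of A's reversed-4-slice sliding window, and replaces A's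
-- flag-and-break outer loop by a parity-set test (objective: alternative, same cost).

-- ===== PORT A =====
-- window check at index i: current_seq = seq[i:i+4]; "".join(reversed(cs)) == cs and cs[0] != cs[1]
def pvWindowHit (s : List Char) (i : Int) : Bool :=
  let cur := PySem.List.slice s (some i) (some (i + 4))
  cur.reverse == cur && PySem.List.pyGet? cur 0 != PySem.List.pyGet? cur 1

-- 'for i in range(0, len(seq)-3): … break' — first-hit scan over the range list
def pvScanA (s : List Char) : List Int → Bool
  | [] => false
  | i :: rest => if pvWindowHit s i then true else pvScanA s rest

def pvHasAbbaA (seq : String) : Bool :=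
  pvScanA seq.toList (PySem.List.pyRange 0 (PySem.Str.len seq - 3) 1)

-- 'for index, seq in enumerate(IP): …' with the two flags; the inner loop's only effect is to
-- set one parity-chosen flag at the first window hit and break, then 'if inside: break'
def pvIPLoop : List (Int × String) → Bool → Bool → Bool × Bool
  | [], out, ins => (out, ins)
  | (idx, seq) :: rest, out, ins =>
      let p :=
        if pvHasAbbaA seq then
          if PySem.Int.mod idx 2 == 0 then (true, ins) else (out, true)
        else (out, ins)
      if p.2 then p else pvIPLoop rest p.1 p.2

def find_TLS_IPs (IPs : List (List String)) : List (List String) :=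
  IPs.foldl (fun TLS_IPs IP =>
    let p := pvIPLoop (PySem.List.enumerate IP 0) false false
    if p.1 && !p.2 then TLS_IPs ++ [IP] else TLS_IPs) []

-- ===== PORT B =====
-- doubles = [k for k in range(len(s) - 1) if s[k] == s[k + 1]]
def pvDoubles (s : List Char) : List Int :=
  (PySem.List.pyRange 0 (PySem.List.len s - 1) 1).filter
    (fun k => PySem.List.pyGet? s k == PySem.List.pyGet? s (k + 1))

-- 1 <= k <= len(s)-3 and s[k-1] == s[k+2] and s[k-1] != s[k]
def pvFlankHit (s : List Char) (k : Int) : Bool :=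
  decide (1 ≤ k) && decide (k ≤ PySem.List.len s - 3) &&
  PySem.List.pyGet? s (k - 1) == PySem.List.pyGet? s (k + 2) &&
  PySem.List.pyGet? s (k - 1) != PySem.List.pyGet? s k

def pvHasAbbaB (seq : String) : Bool :=
  (pvDoubles seq.toList).any (pvFlankHit seq.toList)

-- parities = {i % 2 for i, seq in enumerate(IP) if has_abba(seq)}
def pvParities (IP : List String) : PySem.Set Int :=
  (PySem.List.enumerate IP 0).foldl
    (fun st p => if pvHasAbbaB p.2 then PySem.Set.add st (PySem.Int.mod p.1 2) else st)
    PySem.Set.empty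

def find_TLS_IPs_alt (IPs : List (List String)) : List (List String) :=
  IPs.foldl (fun result IP =>
    if PySem.Set.equal (pvParities IP) (PySem.Set.ofList [0]) then result ++ [IP] else result) []

-- ===== PRECONDITION & SPEC =====
def Spec_find_TLS_IPs (IPs : List (List String)) (out : List (List String)) : Prop := out = find_TLS_IPs_alt IPs
instance (IPs : List (List String)) (out : List (List String)) : Decidable (Spec_find_TLS_IPs IPs out) := by unfold Spec_find_TLS_IPs; infer_instance

-- ===== CLAIM (what is proved, stated in full; the proofs are below) =====
def Claim_equal_find_TLS_IPs : Prop := ∀ (IPs : List (List String)), Dom_find_TLS_IPs IPs → Spec_find_TLS_IPs IPs (find_TLS_IPs IPs)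

-- ===== LEMMAS AND PROOFS =====

-- common characterisation: an ABBA window at Nat index i
def pvAbbaAt (s : List Char) (i : Nat) : Prop :=
  i + 4 ≤ s.length ∧ s[i]? = s[i + 3]? ∧ s[i + 1]? = s[i + 2]? ∧ s[i]? ≠ s[i + 1]?

lemma pvScanA_eq_any (s : List Char) (l : List Int) : pvScanA s l = l.any (pvWindowHit s) := by
  induction l with
  | nil => rfl
  | cons i rest ih => cases h : pvWindowHit s i <;> simp [pvScanA, h, ih]

lemma pvTake4 (s : List Char) (j : Nat) (h : j + 4 ≤ s.length) :
    (s.drop j).take 4 = [s[j]'(by omega), s[j+1]'(by omega), s[j+2]'(by omega), s[j+3]'(by omega)] := by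
  apply List.ext_getElem
  · simp; omega
  · intro m hm _
    simp only [List.getElem_take, List.getElem_drop]
    have hm4 : m < 4 := by simp at hm; omega
    interval_cases m <;> simp

lemma pvWindowHit_iff (s : List Char) (j : Nat) (h : j + 4 ≤ s.length) :
    pvWindowHit s (j : Int) = true ↔ pvAbbaAt s j := by
  have hslice : PySem.List.slice s (some (j : Int)) (some ((j : Int) + 4)) = (s.drop j).take 4 := by
    have : ((j : Int) + 4) = ((j : Int) + ((4 : Nat) : Int)) := by push_cast; ring
    rw [this, PySem.List.slice_natCast_add]
  have h0 : j < s.length := by omega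
  have h1 : j + 1 < s.length := by omega
  have h2 : j + 2 < s.length := by omega
  have h3 : j + 3 < s.length := by omega
  rw [pvWindowHit]
  simp only [hslice, pvTake4 s j h]
  simp only [PySem.List.pyGet?, PySem.List.pyIdx?]
  rw [pvAbbaAt]
  simp [h0, h1, h2, h3]
  constructor
  · rintro ⟨⟨h30, h21, _, _⟩, hne⟩
    exact ⟨h, h30.symm, h21.symm, hne⟩
  · rintro ⟨_, hd, hc, hne⟩
    exact ⟨⟨hd.symm, hc.symm, hc, hd⟩, hne⟩

lemma pvHasAbbaA_iff (seq : String) :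
    pvHasAbbaA seq = true ↔ ∃ i, pvAbbaAt seq.toList i := by
  rw [pvHasAbbaA, PySem.Str.len_eq, pvScanA_eq_any, List.any_eq_true]
  constructor
  · rintro ⟨i, hmem, hhit⟩
    rw [PySem.List.mem_pyRange_one] at hmem
    obtain ⟨hi0, hi1⟩ := hmem
    refine ⟨i.toNat, ?_⟩
    have hc : (i.toNat : Int) = i := by omega
    have hlen : i.toNat + 4 ≤ seq.toList.length := by omega
    rw [← (pvWindowHit_iff seq.toList i.toNat hlen)]
    rwa [hc]
  · rintro ⟨i, hi⟩
    refine ⟨(i : Int), ?_, ?_⟩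
    · rw [PySem.List.mem_pyRange_one]
      have := hi.1; omega
    · exact (pvWindowHit_iff seq.toList i hi.1).2 hi

lemma pvDoublesAny_iff (s : List Char) :
    (pvDoubles s).any (pvFlankHit s) = true ↔ ∃ i, pvAbbaAt s i := by
  rw [List.any_eq_true]
  constructor
  · rintro ⟨k, hmem, hflank⟩
    rw [pvDoubles, List.mem_filter, PySem.List.mem_pyRange_one, PySem.List.len_eq] at hmem
    obtain ⟨⟨hk0, _⟩, hdbl⟩ := hmem
    rw [pvFlankHit, PySem.List.len_eq] at hflank
    simp only [Bool.and_eq_true, decide_eq_true_eq, bne_iff_ne, beq_iff_eq] at hflank hdbl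
    obtain ⟨⟨⟨hk1, hk3⟩, hfl⟩, hne⟩ := hflank
    set m := k.toNat with hm
    have hck : (m : Int) = k := by omega
    refine ⟨m - 1, ?_, ?_, ?_, ?_⟩
    · omega
    · have e1 : ((m - 1 : Nat) : Int) = k - 1 := by omega
      have e2 : ((m - 1 + 3 : Nat) : Int) = k + 2 := by omega
      rw [← PySem.List.pyGet?_natCast, ← PySem.List.pyGet?_natCast (n := m - 1 + 3), e1, e2]
      exact hfl
    · have e1 : ((m - 1 + 1 : Nat) : Int) = k := by omega
      have e2 : ((m - 1 + 2 : Nat) : Int) = k + 1 := by omega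
      rw [← PySem.List.pyGet?_natCast, ← PySem.List.pyGet?_natCast (n := m - 1 + 2), e1, e2]
      exact hdbl
    · have e1 : ((m - 1 : Nat) : Int) = k - 1 := by omega
      have e2 : ((m - 1 + 1 : Nat) : Int) = k := by omega
      rw [← PySem.List.pyGet?_natCast, ← PySem.List.pyGet?_natCast (n := m - 1 + 1), e1, e2]
      exact hne
  · rintro ⟨i, hlen, habba, hdbl, hne⟩
    refine ⟨((i + 1 : Nat) : Int), ?_, ?_⟩
    · rw [pvDoubles, List.mem_filter, PySem.List.mem_pyRange_one, PySem.List.len_eq]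
      refine ⟨⟨by omega, by omega⟩, ?_⟩
      have e2 : ((i + 1 : Nat) : Int) + 1 = ((i + 2 : Nat) : Int) := by omega
      rw [e2, PySem.List.pyGet?_natCast, PySem.List.pyGet?_natCast]
      simpa using hdbl
    · rw [pvFlankHit, PySem.List.len_eq]
      have e0 : ((i + 1 : Nat) : Int) - 1 = ((i : Nat) : Int) := by omega
      have e3 : ((i + 1 : Nat) : Int) + 2 = ((i + 3 : Nat) : Int) := by omega
      simp only [e0, e3, PySem.List.pyGet?_natCast, Bool.and_eq_true, decide_eq_true_eq,
        bne_iff_ne, beq_iff_eq]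
      refine ⟨⟨⟨by omega, by omega⟩, habba⟩, ?_⟩
      simpa using hne

lemma pvHasAbbaB_iff (seq : String) :
    pvHasAbbaB seq = true ↔ ∃ i, pvAbbaAt seq.toList i := by
  rw [pvHasAbbaB, pvDoublesAny_iff]

lemma pvHasAbbaA_eq (seq : String) : pvHasAbbaA seq = pvHasAbbaB seq := by
  rw [Bool.eq_iff_iff, pvHasAbbaA_iff, pvHasAbbaB_iff]

-- parity-indexed "some sequence in l has an ABBA"
def pvE (par : Int) (l : List (Int × String)) : Bool :=
  l.any (fun p => (PySem.Int.mod p.1 2 == par) && pvHasAbbaB p.2)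

lemma pvParityBeq (idx : Int) :
    (PySem.Int.mod idx 2 == 1) = !(PySem.Int.mod idx 2 == 0) := by
  rcases PySem.Int.mod_two_eq idx with h | h <;> rw [h] <;> decide

lemma pvIPLoop_inv (l : List (Int × String)) :
    ∀ out, (let p := pvIPLoop l out false; p.1 && !p.2) = ((out || pvE 0 l) && !(pvE 1 l)) := by
  induction l with
  | nil => intro out; simp [pvIPLoop, pvE]
  | cons hd rest ih =>
      intro out
      obtain ⟨idx, seq⟩ := hd
      simp only [pvIPLoop, pvHasAbbaA_eq, pvE, List.any_cons, pvParityBeq]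
      simp only [pvE, pvParityBeq] at ih
      cases hpar : (PySem.Int.mod idx 2 == 0) <;> cases hhit : pvHasAbbaB seq
      · -- odd position (beq false), no hit: flags unchanged
        simpa [hpar, hhit] using ih out
      · -- odd position, hit: inside set, loop breaks, result false
        simp
      · -- even position, no hit
        simpa [hpar, hhit] using ih out
      · -- even position, hit: outside flag set to true, continue
        simpa [hpar, hhit] using ih true

lemma pvMem_parities_fold (l : List (Int × String)) :
    ∀ (init : List Int) (x : Int),
      (x ∈ l.foldl (fun st p => if pvHasAbbaB p.2 then PySem.Set.add st (PySem.Int.mod p.1 2) else st) init) ↔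
      (x ∈ init ∨ ∃ p ∈ l, pvHasAbbaB p.2 ∧ x = PySem.Int.mod p.1 2) := by
  induction l with
  | nil => intro init x; simp
  | cons hd rest ih =>
      intro init x
      simp only [List.foldl_cons, List.mem_cons]
      by_cases hhit : pvHasAbbaB hd.2
      · rw [hhit, if_pos rfl, ih, PySem.Set.mem_add]
        constructor
        · rintro (⟨h | h⟩ | h)
          · exact Or.inl h
          · exact Or.inr ⟨hd, Or.inl rfl, hhit, h⟩
          · obtain ⟨p, hp, h1, h2⟩ := h; exact Or.inr ⟨p, Or.inr hp, h1, h2⟩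
        · rintro (h | ⟨p, hp | hp, h1, h2⟩)
          · exact Or.inl (Or.inl h)
          · exact Or.inl (Or.inr (by rw [hp] at h2; exact h2))
          · exact Or.inr ⟨p, hp, h1, h2⟩
      · rw [if_neg hhit, ih]
        constructor
        · rintro (h | ⟨p, hp, h1, h2⟩)
          · exact Or.inl h
          · exact Or.inr ⟨p, Or.inr hp, h1, h2⟩
        · rintro (h | ⟨p, hp | hp, h1, h2⟩)
          · exact Or.inl h
          · exact absurd h1 (by rw [← hp] at hhit; exact hhit)
          · exact Or.inr ⟨p, hp, h1, h2⟩

lemma pvMem_parities (IP : List String) (x : Int) :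
    x ∈ pvParities IP ↔ ∃ p ∈ PySem.List.enumerate IP 0, pvHasAbbaB p.2 ∧ x = PySem.Int.mod p.1 2 := by
  rw [pvParities, pvMem_parities_fold]
  simp [PySem.Set.empty]

lemma pvPerIP (IP : List String) :
    (let p := pvIPLoop (PySem.List.enumerate IP 0) false false; p.1 && !p.2) =
    PySem.Set.equal (pvParities IP) (PySem.Set.ofList [0]) := by
  rw [pvIPLoop_inv (PySem.List.enumerate IP 0) false, Bool.eq_iff_iff, PySem.Set.equal_iff]
  simp only [Bool.false_or, Bool.and_eq_true, Bool.not_eq_true']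
  constructor
  · rintro ⟨h0, h1⟩
    rw [pvE, List.any_eq_true] at h0
    obtain ⟨p0, hp0, hq0⟩ := h0
    rw [Bool.and_eq_true, beq_iff_eq] at hq0
    obtain ⟨hm0, hb0⟩ := hq0
    rw [pvE, List.any_eq_false] at h1
    intro x
    rw [pvMem_parities, PySem.Set.mem_ofList, List.mem_singleton]
    constructor
    · rintro ⟨p, hp, hb, rfl⟩
      rcases PySem.Int.mod_two_eq p.1 with hm | hm
      · exact hm
      · have hf := h1 p hp
        rw [hm, hb] at hf
        exact absurd hf (by decide)
    · rintro rfl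
      exact ⟨p0, hp0, hb0, hm0.symm⟩
  · intro h
    constructor
    · have h0 : (0 : Int) ∈ pvParities IP := (h 0).2 (by decide)
      rw [pvMem_parities] at h0
      obtain ⟨p, hp, hb, hm⟩ := h0
      rw [pvE, List.any_eq_true]
      refine ⟨p, hp, ?_⟩
      rw [Bool.and_eq_true, beq_iff_eq]
      exact ⟨hm.symm, hb⟩
    · rw [pvE, List.any_eq_false]
      intro p hp
      by_cases hb : pvHasAbbaB p.2 = true
      · rcases PySem.Int.mod_two_eq p.1 with hm | hm
        · intro hc
          rw [hm] at hc
          simp at hc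
        · exfalso
          have h1 : (1 : Int) ∈ pvParities IP := by
            rw [pvMem_parities]; exact ⟨p, hp, hb, hm.symm⟩
          have := (h 1).1 h1
          rw [PySem.Set.mem_ofList, List.mem_singleton] at this
          exact absurd this (by decide)
      · intro hc
        rw [Bool.and_eq_true] at hc
        exact hb hc.2

-- ===== VERDICT (by name: the statement is the Claim_ definition above) =====
theorem find_TLS_IPs_spec : Claim_equal_find_TLS_IPs := by
  intro IPs _
  show find_TLS_IPs IPs = find_TLS_IPs_alt IPs
  rw [find_TLS_IPs, find_TLS_IPs_alt]
  simp only [pvPerIP]
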